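-- pv_equiv track=rewrite | github.com/alexforcode/adventofcode | day06/memory_banks_part1.py | reallocate_list
-- ===== SOURCE A (Python) =====
-- def reallocate_list(ls: list, val: int, index: int) -> list:
--     '''
--     Add 1 from val param to each element of list in cycle begin from index + 1 until out of val (val = 0).
--     Return result list.
--     '''
--     while val > 0:
--         if index == len(ls) - 1:
--             index = 0
--         else:
--             index += 1
--         ls[index] += 1
--         val -= 1
--
--     return ls
-- ===== SOURCE B (Python) =====
-- def reallocate_list(ls: list, val: int, index: int) -> list:
--     '''
--     Add 1 from val param to each element of list in cycle begin from index + 1 until out of val (val = 0).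
--     Return result list.  (closed form with slice passes instead of A's one-unit-at-a-time loop; mutates ls in place like A)
--     '''
--     n = len(ls)
--     if val <= 0 or n == 0:
--         return ls
--     q, r = divmod(val, n)
--     s = (index + 1) % n
--     e = s + r
--     if q == 0:
--         # fewer than n units: only the r positions cyclically after index change
--         if e <= n:
--             ls[s:e] = [x + 1 for x in ls[s:e]]
--         else:
--             e -= n
--             ls[:e] = [x + 1 for x in ls[:e]]
--             ls[s:] = [x + 1 for x in ls[s:]]
--         return ls
--     if e <= n:
--         ls[:] = [x + q for x in ls[:s]] + [x + q + 1 for x in ls[s:e]] + [x + q for x in ls[e:]]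
--     else:
--         e -= n
--         ls[:] = [x + q + 1 for x in ls[:e]] + [x + q for x in ls[e:s]] + [x + q + 1 for x in ls[s:]]
--     return ls
-- ===== Notes on version B (the rewrite author's own statement) =====
-- stated objective: faster
-- what changed: Replaces the O(val) one-unit-at-a-time distribution loop with a closed-form O(n) pass: each element gets val//n, and the first val%n positions cyclically after index get one extra.
import Mathlib
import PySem

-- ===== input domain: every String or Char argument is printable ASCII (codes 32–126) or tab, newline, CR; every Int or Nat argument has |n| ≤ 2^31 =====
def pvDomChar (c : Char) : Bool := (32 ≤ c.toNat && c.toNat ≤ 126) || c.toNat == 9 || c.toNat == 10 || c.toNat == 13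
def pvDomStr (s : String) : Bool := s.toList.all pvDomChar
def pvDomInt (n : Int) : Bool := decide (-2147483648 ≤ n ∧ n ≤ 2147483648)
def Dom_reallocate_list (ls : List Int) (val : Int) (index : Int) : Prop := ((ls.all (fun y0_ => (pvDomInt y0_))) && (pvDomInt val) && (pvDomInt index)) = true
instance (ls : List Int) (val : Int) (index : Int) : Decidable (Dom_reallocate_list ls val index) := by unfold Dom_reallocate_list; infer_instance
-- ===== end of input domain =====

-- B replaces A's O(val) one-unit-at-a-time loop by a closed-form O(n) pass (each element
-- gains val//n, the first val%n positions cyclically after index gain one extra); both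
-- Pythons mutate ls in place the same way, the theorems are about the return value.

-- ===== PORT A =====
-- A's while-loop: advance index cyclically, increment ls[index], decrement val.
def reallocate_loop (ls : List Int) (val : Int) (index : Int) : List Int :=
  if _h : 0 < val then
    let index' : Int := if index = (ls.length : Int) - 1 then 0 else index + 1
    match PySem.List.pyGet? ls index' with
    | some x => reallocate_loop (PySem.List.pySetD ls index' (x + 1)) (val - 1) index'
    | none => ls   -- Python raises IndexError here; excluded by Pre_
  else ls
termination_by val.toNat
decreasing_by omega

def reallocate_list (ls : List Int) (val : Int) (index : Int) : List Int :=
  reallocate_loop ls val index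

-- ===== PORT B =====
def reallocate_list_alt (ls : List Int) (val : Int) (index : Int) : List Int :=
  let n : Int := ls.length
  if val ≤ 0 ∨ n = 0 then ls
  else
    let q := PySem.Int.floordiv val n
    let r := PySem.Int.mod val n
    let s := PySem.Int.mod (index + 1) n
    let e := s + r
    if q = 0 then
      -- slice assignment ls[a:b] = u is ported as prefix ++ u ++ suffix (exact: 0 ≤ a ≤ b ≤ n here)
      if e ≤ n then
        PySem.List.slice ls none (some s)
          ++ (PySem.List.slice ls (some s) (some e)).map (fun x => x + 1)
          ++ PySem.List.slice ls (some e) none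
      else
        let e := e - n
        let ls1 := (PySem.List.slice ls none (some e)).map (fun x => x + 1)
          ++ PySem.List.slice ls (some e) none
        PySem.List.slice ls1 none (some s)
          ++ (PySem.List.slice ls1 (some s) none).map (fun x => x + 1)
    else
      if e ≤ n then
        (PySem.List.slice ls none (some s)).map (fun x => x + q)
          ++ (PySem.List.slice ls (some s) (some e)).map (fun x => x + q + 1)
          ++ (PySem.List.slice ls (some e) none).map (fun x => x + q)
      else
        let e := e - n
        (PySem.List.slice ls none (some e)).map (fun x => x + q + 1)
          ++ (PySem.List.slice ls (some e) (some s)).map (fun x => x + q)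
          ++ (PySem.List.slice ls (some s) none).map (fun x => x + q + 1)

-- ===== PRECONDITION & SPEC =====
-- Pre_ excludes exactly the inputs where A raises IndexError: val > 0 with an empty list
-- or with index outside [-len(ls)-1, len(ls)-1].
def Pre_reallocate_list (ls : List Int) (val : Int) (index : Int) : Prop :=
  val ≤ 0 ∨ (ls ≠ [] ∧ -(ls.length : Int) - 1 ≤ index ∧ index < (ls.length : Int))
instance (ls : List Int) (val : Int) (index : Int) : Decidable (Pre_reallocate_list ls val index) := by unfold Pre_reallocate_list; infer_instance

def pvWitness_reallocate_list : List Int × Int × Int := ([1, 2, 3], 7, 1)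

def Spec_reallocate_list (ls : List Int) (val : Int) (index : Int) (out : List Int) : Prop := out = reallocate_list_alt ls val index
instance (ls : List Int) (val : Int) (index : Int) (out : List Int) : Decidable (Spec_reallocate_list ls val index out) := by unfold Spec_reallocate_list; infer_instance

-- ===== CLAIM (what is proved, stated in full; the proofs are below) =====
def Claim_equal_reallocate_list : Prop := ∀ (ls : List Int) (val : Int) (index : Int), Dom_reallocate_list ls val index → Pre_reallocate_list ls val index → Spec_reallocate_list ls val index (reallocate_list ls val index)

-- ===== LEMMAS AND PROOFS =====

lemma mod_small (a n : Int) (hn : 0 < n) (h1 : -n ≤ a) (h2 : a < n) :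
    PySem.Int.mod a n = if a < 0 then a + n else a := by
  rw [PySem.Int.mod_eq_emod_of_pos hn]
  by_cases h : a < 0
  · rw [if_pos h, ← Int.add_mul_emod_self_left a n 1, mul_one,
      Int.emod_eq_of_lt (by omega) (by omega)]
  · rw [if_neg h, Int.emod_eq_of_lt (by omega) h2]

lemma divmod_unique (a n q r : Int) (hn : 0 < n) (h0 : 0 ≤ r) (h1 : r < n)
    (he : a = n * q + r) :
    PySem.Int.floordiv a n = q ∧ PySem.Int.mod a n = r := by
  rw [PySem.Int.floordiv_eq_ediv_of_pos hn, PySem.Int.mod_eq_emod_of_pos hn]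
  exact (Int.ediv_emod_unique hn).mpr ⟨by omega, h0, h1⟩

lemma pyGet?_mod (ls : List Int) (i : Int) (h1 : -(ls.length : Int) ≤ i)
    (h2 : i < (ls.length : Int)) :
    PySem.List.pyGet? ls i =
      some (ls.getD (PySem.Int.mod i (ls.length : Int)).toNat 0) := by
  have hn : (0:Int) < ls.length := by omega
  rw [mod_small i _ hn h1 h2]
  simp only [PySem.List.pyGet?, PySem.List.pyIdx?]
  split_ifs with ha hb hc <;> try omega
  · simp only [Option.bind_some]
    rw [List.getElem?_eq_getElem (by omega), List.getD_eq_getElem _ _ (by omega)]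
  · have he : ls.length - (-i).toNat = (i + (ls.length:Int)).toNat := by omega
    rw [he]
    simp only [Option.bind_some]
    rw [List.getElem?_eq_getElem (by omega), List.getD_eq_getElem _ _ (by omega)]

lemma pySetD_mod (ls : List Int) (i v : Int) (h1 : -(ls.length : Int) ≤ i)
    (h2 : i < (ls.length : Int)) :
    PySem.List.pySetD ls i v = ls.set (PySem.Int.mod i (ls.length : Int)).toNat v := by
  have hn : (0:Int) < ls.length := by omega
  rw [mod_small i _ hn h1 h2]
  simp only [PySem.List.pySetD, PySem.List.pySet?, PySem.List.pyIdx?]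
  split_ifs with ha hb hc <;> try omega
  · simp
  · have he : ls.length - (-i).toNat = (i + (ls.length:Int)).toNat := by omega
    rw [he]
    simp

-- indexing into the three-segment decomposition take a / middle / drop b, both outer segments mapped
lemma tri_elem (ls : List Int) (a b : Nat) (f g : Int → Int) (hab : a ≤ b)
    (hbn : b ≤ ls.length) (j : Nat) (hj : j < ls.length) :
    ((ls.take a).map f ++ (((ls.drop a).take (b - a)).map g ++ (ls.drop b).map f))[j]? =
      some (if j < a then f (ls[j]) else if j < b then g (ls[j]) else f (ls[j])) := by
  have hl1 : ((ls.take a).map f).length = a := by simp; omega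
  have hl2 : (((ls.drop a).take (b - a)).map g).length = b - a := by simp; omega
  by_cases h1 : j < a
  · rw [List.getElem?_append_left (by omega), List.getElem?_map,
      List.getElem?_take_of_lt h1, List.getElem?_eq_getElem hj, if_pos h1]
    rfl
  · rw [List.getElem?_append_right (by omega), hl1]
    by_cases h2 : j < b
    · rw [List.getElem?_append_left (by rw [hl2]; omega), List.getElem?_map,
        List.getElem?_take_of_lt (by omega), List.getElem?_drop,
        show a + (j - a) = j by omega, List.getElem?_eq_getElem hj,
        if_neg h1, if_pos h2]
      rfl
    · rw [List.getElem?_append_right (by rw [hl2]; omega), hl2, List.getElem?_map,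
        List.getElem?_drop, show b + (j - a - (b - a)) = j by omega,
        List.getElem?_eq_getElem hj, if_neg h1, if_neg h2]
      rfl

-- same decomposition with the outer segments untouched (the q = 0 slice assignment)
lemma tri_elem2 (ls : List Int) (a b : Nat) (g : Int → Int) (hab : a ≤ b)
    (hbn : b ≤ ls.length) (j : Nat) (hj : j < ls.length) :
    (ls.take a ++ (((ls.drop a).take (b - a)).map g ++ ls.drop b))[j]? =
      some (if j < a then ls[j] else if j < b then g (ls[j]) else ls[j]) := by
  have hl1 : (ls.take a).length = a := by simp; omega
  have hl2 : (((ls.drop a).take (b - a)).map g).length = b - a := by simp; omega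
  by_cases h1 : j < a
  · rw [List.getElem?_append_left (by omega), List.getElem?_take_of_lt h1,
      List.getElem?_eq_getElem hj, if_pos h1]
  · rw [List.getElem?_append_right (by omega), hl1]
    by_cases h2 : j < b
    · rw [List.getElem?_append_left (by rw [hl2]; omega), List.getElem?_map,
        List.getElem?_take_of_lt (by omega), List.getElem?_drop,
        show a + (j - a) = j by omega, List.getElem?_eq_getElem hj,
        if_neg h1, if_pos h2]
      rfl
    · rw [List.getElem?_append_right (by rw [hl2]; omega), hl2,
        List.getElem?_drop, show b + (j - a - (b - a)) = j by omega,
        List.getElem?_eq_getElem hj, if_neg h1, if_neg h2]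

-- the two wrapped q = 0 slice assignments: ls[:e] then ls[s:], e ≤ s
lemma wrap_elem (ls : List Int) (e s : Nat) (g : Int → Int) (hes : e ≤ s)
    (hsn : s ≤ ls.length) (j : Nat) (hj : j < ls.length) :
    (((ls.take e).map g ++ ls.drop e).take s
        ++ (((ls.take e).map g ++ ls.drop e).drop s).map g)[j]? =
      some (if j < e then g (ls[j]) else if j < s then ls[j] else g (ls[j])) := by
  have hL1 : ((ls.take e).map g ++ ls.drop e).length = ls.length := by simp; omega
  have hl1 : (((ls.take e).map g ++ ls.drop e).take s).length = s := by simp; omega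
  have hle : ((ls.take e).map g).length = e := by simp; omega
  by_cases h1 : j < s
  · rw [List.getElem?_append_left (by omega), List.getElem?_take_of_lt h1]
    by_cases h2 : j < e
    · rw [List.getElem?_append_left (by omega), List.getElem?_map,
        List.getElem?_take_of_lt h2, List.getElem?_eq_getElem hj, if_pos h2]
      rfl
    · rw [List.getElem?_append_right (by omega), hle, List.getElem?_drop,
        show e + (j - e) = j by omega, List.getElem?_eq_getElem hj,
        if_neg h2, if_pos h1]
  · rw [List.getElem?_append_right (by omega), hl1, List.getElem?_map,
      List.getElem?_drop, show s + (j - s) = j by omega,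
      List.getElem?_append_right (by omega), hle, List.getElem?_drop,
      show e + (j - e) = j by omega, List.getElem?_eq_getElem hj,
      if_neg (by omega : ¬ j < e), if_neg h1]
    rfl

lemma length_alt (ls : List Int) (val index : Int) :
    (reallocate_list_alt ls val index).length = ls.length := by
  simp only [reallocate_list_alt]
  split
  · rfl
  · next h =>
    have hnn : (0:Int) < (ls.length : Int) := by push Not at h; omega
    have hs0 : 0 ≤ PySem.Int.mod (index + 1) (ls.length : Int) :=
      PySem.Int.mod_nonneg _ hnn
    have hs1 : PySem.Int.mod (index + 1) (ls.length : Int) < (ls.length : Int) :=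
      PySem.Int.mod_lt _ hnn
    have hr0 : 0 ≤ PySem.Int.mod val (ls.length : Int) := PySem.Int.mod_nonneg _ hnn
    have hr1 : PySem.Int.mod val (ls.length : Int) < (ls.length : Int) :=
      PySem.Int.mod_lt _ hnn
    split
    · split
      · next he =>
        rw [PySem.List.slice_to ls hs0, PySem.List.slice_from ls (by omega),
          PySem.List.slice_toNat ls hs0 (by omega)]
        simp only [List.length_append, List.length_map, List.length_take, List.length_drop]
        omega
      · next he =>
        rw [PySem.List.slice_to ls (by omega), PySem.List.slice_from ls (by omega)]
        rw [PySem.List.slice_to _ hs0, PySem.List.slice_from _ hs0]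
        simp only [List.length_append, List.length_map, List.length_take, List.length_drop]
        omega
    · split
      · next he =>
        rw [PySem.List.slice_to ls hs0, PySem.List.slice_from ls (by omega),
          PySem.List.slice_toNat ls hs0 (by omega)]
        simp only [List.length_append, List.length_map, List.length_take, List.length_drop]
        omega
      · next he =>
        rw [PySem.List.slice_to ls (by omega), PySem.List.slice_from ls hs0,
          PySem.List.slice_toNat ls (by omega) hs0]
        simp only [List.length_append, List.length_map, List.length_take, List.length_drop]
        omega

lemma alt_elem (ls : List Int) (val index : Int) (hn : 0 < ls.length) (hval : 0 ≤ val)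
    (j : Nat) (hj : j < ls.length) :
    (reallocate_list_alt ls val index)[j]? =
      some (ls[j] + PySem.Int.floordiv val (ls.length : Int) +
        if PySem.Int.mod ((j : Int) - PySem.Int.mod (index + 1) (ls.length : Int))
            (ls.length : Int) < PySem.Int.mod val (ls.length : Int) then 1 else 0) := by
  have hnn : (0:Int) < (ls.length : Int) := by omega
  set q := PySem.Int.floordiv val (ls.length : Int) with hqdef
  set r := PySem.Int.mod val (ls.length : Int) with hrdef
  set s := PySem.Int.mod (index + 1) (ls.length : Int) with hsdef
  have hr0 : 0 ≤ r := PySem.Int.mod_nonneg _ hnn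
  have hr1 : r < (ls.length : Int) := PySem.Int.mod_lt _ hnn
  have hs0 : 0 ≤ s := PySem.Int.mod_nonneg _ hnn
  have hs1 : s < (ls.length : Int) := PySem.Int.mod_lt _ hnn
  clear_value q r s
  by_cases hv : val = 0
  · subst hv
    have hq0 : q = 0 := by
      rw [hqdef, PySem.Int.floordiv_eq_ediv_of_pos hnn]; simp
    have hrz : r = 0 := by
      rw [hrdef, PySem.Int.mod_eq_emod_of_pos hnn]; simp
    simp only [reallocate_list_alt, if_pos (by omega : (0:Int) ≤ 0 ∨ (ls.length:Int) = 0)]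
    rw [List.getElem?_eq_getElem hj, hq0, hrz,
      if_neg (by have := PySem.Int.mod_nonneg ((j:Int) - s) hnn; omega)]
    simp
  · simp only [reallocate_list_alt,
      if_neg (by push Not; omega : ¬(val ≤ 0 ∨ (ls.length:Int) = 0)), ← hqdef, ← hrdef, ← hsdef]
    by_cases hq0 : q = 0
    · rw [if_pos hq0]
      by_cases he : s + r ≤ (ls.length : Int)
      · rw [if_pos he, PySem.List.slice_to ls hs0, PySem.List.slice_from ls (by omega),
          PySem.List.slice_toNat ls hs0 (by omega), List.append_assoc,
          tri_elem2 ls s.toNat (s + r).toNat _ (by omega) (by omega) j hj]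
        rcases lt_or_ge ((j:Int) - s) 0 with hneg | hneg
        · rw [mod_small _ _ hnn (by omega) (by omega), if_pos hneg, Option.some.injEq]
          split_ifs <;> omega
        · rw [mod_small _ _ hnn (by omega) (by omega), if_neg (by omega), Option.some.injEq]
          split_ifs <;> omega
      · rw [if_neg he, PySem.List.slice_to ls (by omega), PySem.List.slice_from ls (by omega)]
        rw [PySem.List.slice_to _ hs0, PySem.List.slice_from _ hs0,
          wrap_elem ls (s + r - (ls.length:Int)).toNat s.toNat _ (by omega) (by omega) j hj]
        rcases lt_or_ge ((j:Int) - s) 0 with hneg | hneg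
        · rw [mod_small _ _ hnn (by omega) (by omega), if_pos hneg, Option.some.injEq]
          split_ifs <;> omega
        · rw [mod_small _ _ hnn (by omega) (by omega), if_neg (by omega), Option.some.injEq]
          split_ifs <;> omega
    · rw [if_neg hq0]
      by_cases he : s + r ≤ (ls.length : Int)
      · rw [if_pos he, PySem.List.slice_to ls hs0, PySem.List.slice_from ls (by omega),
          PySem.List.slice_toNat ls hs0 (by omega), List.append_assoc,
          tri_elem ls s.toNat (s + r).toNat _ _ (by omega) (by omega) j hj]
        rcases lt_or_ge ((j:Int) - s) 0 with hneg | hneg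
        · rw [mod_small _ _ hnn (by omega) (by omega), if_pos hneg, Option.some.injEq]
          split_ifs <;> omega
        · rw [mod_small _ _ hnn (by omega) (by omega), if_neg (by omega), Option.some.injEq]
          split_ifs <;> omega
      · rw [if_neg he, PySem.List.slice_to ls (by omega), PySem.List.slice_from ls hs0,
          PySem.List.slice_toNat ls (by omega) hs0, List.append_assoc,
          tri_elem ls (s + r - (ls.length:Int)).toNat s.toNat _ _ (by omega) (by omega) j hj]
        rcases lt_or_ge ((j:Int) - s) 0 with hneg | hneg
        · rw [mod_small _ _ hnn (by omega) (by omega), if_pos hneg, Option.some.injEq]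
          split_ifs <;> omega
        · rw [mod_small _ _ hnn (by omega) (by omega), if_neg (by omega), Option.some.injEq]
          split_ifs <;> omega

-- The heart: distributing one more unit at position s shifts the closed form by one step.
lemma key (n val s j : Int) (hn : 0 < n) (hs0 : 0 ≤ s) (hs1 : s < n)
    (hj0 : 0 ≤ j) (hj1 : j < n) :
    PySem.Int.floordiv val n +
      (if PySem.Int.mod (j - s) n < PySem.Int.mod val n then (1:Int) else 0) =
    (if j = s then 1 else 0) + PySem.Int.floordiv (val - 1) n +
      (if PySem.Int.mod (j - PySem.Int.mod (s + 1) n) n < PySem.Int.mod (val - 1) n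
        then 1 else 0) := by
  have hs' : PySem.Int.mod (s + 1) n = if s = n - 1 then 0 else s + 1 := by
    by_cases h : s = n - 1
    · rw [if_pos h, h, sub_add_cancel, PySem.Int.mod_eq_emod_of_pos hn, Int.emod_self]
    · rw [if_neg h, mod_small _ _ hn (by omega) (by omega), if_neg (by omega)]
  rw [hs']
  have hq := PySem.Int.floordiv_mul_add_mod val n
  have hr0 := PySem.Int.mod_nonneg val hn
  have hr1 := PySem.Int.mod_lt val hn
  set q := PySem.Int.floordiv val n with hqdef
  set r := PySem.Int.mod val n with hrdef
  rw [mod_small (j - s) n hn (by omega) (by omega)]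
  by_cases hr : r = 0
  · obtain ⟨hq', hr'⟩ := divmod_unique (val - 1) n (q - 1) (n - 1) hn (by omega) (by omega)
      (by linear_combination -hq + hr)
    rw [hq', hr']
    by_cases hsn : s = n - 1
    · rw [if_pos hsn, sub_zero, mod_small j n hn (by omega) (by omega)]
      split_ifs <;> omega
    · rw [if_neg hsn, mod_small (j - (s+1)) n hn (by omega) (by omega)]
      split_ifs <;> omega
  · obtain ⟨hq', hr'⟩ := divmod_unique (val - 1) n q (r - 1) hn (by omega) (by omega)
      (by linear_combination -hq)
    rw [hq', hr']
    by_cases hsn : s = n - 1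
    · rw [if_pos hsn, sub_zero, mod_small j n hn (by omega) (by omega)]
      split_ifs <;> omega
    · rw [if_neg hsn, mod_small (j - (s+1)) n hn (by omega) (by omega)]
      split_ifs <;> omega

lemma loop_eq_alt (k : Nat) : ∀ (ls : List Int) (val index : Int), val.toNat ≤ k →
    0 < ls.length → -(ls.length : Int) - 1 ≤ index → index < (ls.length : Int) →
    reallocate_loop ls val index = reallocate_list_alt ls val index := by
  induction k with
  | zero =>
    intro ls val index hk hn h1 h2
    rw [reallocate_loop, dif_neg (by omega)]
    simp only [reallocate_list_alt, if_pos (Or.inl (by omega : val ≤ 0))]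
  | succ k ih =>
    intro ls val index hk hn h1 h2
    by_cases hv : 0 < val
    · have hnn : (0:Int) < (ls.length : Int) := by omega
      rw [reallocate_loop, dif_pos hv]
      have hi1 : -(ls.length:Int) ≤ (if index = (ls.length:Int) - 1 then 0 else index + 1) := by
        split <;> omega
      have hi2 : (if index = (ls.length:Int) - 1 then 0 else index + 1) < (ls.length:Int) := by
        split <;> omega
      simp only [pyGet?_mod ls _ hi1 hi2, pySetD_mod ls _ _ hi1 hi2]
      set index' : Int := if index = (ls.length:Int) - 1 then 0 else index + 1 with hidef
      -- the mod of index' equals the mod of index+1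
      have hmod : PySem.Int.mod index' (ls.length:Int)
          = PySem.Int.mod (index + 1) (ls.length:Int) := by
        rw [hidef]
        by_cases h : index = (ls.length:Int) - 1
        · rw [if_pos h, h, sub_add_cancel]
          simp [PySem.Int.mod_eq_emod_of_pos hnn]
        · rw [if_neg h]
      set s : Int := PySem.Int.mod (index + 1) (ls.length:Int) with hsdef
      have hs0 : 0 ≤ s := PySem.Int.mod_nonneg _ hnn
      have hs1 : s < (ls.length:Int) := PySem.Int.mod_lt _ hnn
      rw [hmod]
      set ls1 := ls.set s.toNat (ls.getD s.toNat 0 + 1) with hls1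
      have hlen1 : ls1.length = ls.length := by rw [hls1]; simp
      rw [ih ls1 (val - 1) index' (by omega) (by omega) (by rw [hlen1]; omega)
        (by rw [hlen1]; exact hi2)]
      -- now: alt ls1 (val-1) index' = alt ls val index, elementwise
      have hstep : PySem.Int.mod (index' + 1) (ls.length:Int)
          = PySem.Int.mod (s + 1) (ls.length:Int) := by
        rw [hidef, hsdef]
        by_cases h : index = (ls.length:Int) - 1
        · rw [if_pos h, h, sub_add_cancel]
          simp [PySem.Int.mod_eq_emod_of_pos hnn]
        · rw [if_neg h]
          rw [PySem.Int.mod_eq_emod_of_pos hnn, PySem.Int.mod_eq_emod_of_pos hnn,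
            PySem.Int.mod_eq_emod_of_pos hnn, Int.emod_add_emod]
      symm
      apply List.ext_getElem?
      intro j
      by_cases hjlt : j < ls.length
      · rw [alt_elem ls val index hn (by omega) j hjlt,
          alt_elem ls1 (val - 1) index' (by omega) (by omega) j (by omega),
          ]
        simp only [hlen1]
        rw [hstep]
        have hget1 : ls1[j]'(by omega) = if (j:Int) = s then ls[j]'hjlt + 1 else ls[j]'hjlt := by
          simp only [hls1, List.getElem_set]
          by_cases hj : (j:Int) = s
          · rw [if_pos (by omega : s.toNat = j), if_pos hj]
            congr 1
            rw [List.getD_eq_getElem _ _ (by omega)]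
            congr 1
            omega
          · rw [if_neg (by omega : ¬ s.toNat = j), if_neg hj]
        rw [hget1, ← hsdef]
        have hkey := key (ls.length:Int) val s (j:Int) hnn hs0 hs1 (by omega) (by omega)
        simp only [Option.some.injEq]
        split_ifs at hkey ⊢ <;> omega
      · rw [List.getElem?_eq_none (by rw [length_alt]; omega),
          List.getElem?_eq_none (by rw [length_alt, hlen1]; omega)]
    · rw [reallocate_loop, dif_neg hv]
      simp only [reallocate_list_alt, if_pos (Or.inl (by omega : val ≤ 0))]

-- ===== VERDICT (by name: the statement is the Claim_ definition above) =====
theorem reallocate_list_spec : Claim_equal_reallocate_list := by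
  intro ls val index _ hpre
  unfold Spec_reallocate_list reallocate_list
  rcases hpre with hval | ⟨hne, h1, h2⟩
  · rw [reallocate_loop, dif_neg (by omega)]
    simp only [reallocate_list_alt, if_pos (Or.inl hval)]
  · have hn : 0 < ls.length := by cases ls <;> simp_all
    exact loop_eq_alt val.toNat ls val index le_rfl hn (by omega) h2
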